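-- pv_equiv track=rewrite | github.com/eXtc-be/AdventOfCode | 2015/15/aoc_2015_15_A_1.py | _score_combo
-- ===== SOURCE A (Python) =====
-- from functools import reduce
-- from operator import mul
--
-- PROPERTIES = 'capacity durability flavor texture'.split()
--
-- def _score_combo(combo: dict[str, int], ingredients: dict[str, dict[str, int]]) -> int:
--     scores = []
--
--     for property in PROPERTIES:
--         score = 0
--         for ingredient in combo:
--             score += ingredients[ingredient][property] * combo[ingredient]
--         if score > 0:
--             scores.append(score)
--         else:
--             return 0
--
--     return reduce(mul, scores, 1)
-- ===== SOURCE B (Python) =====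
-- PROPERTIES = 'capacity durability flavor texture'.split()
--
--
-- def _score_combo(combo: dict[str, int], ingredients: dict[str, dict[str, int]]) -> int:
--     # single ingredient-outer pass accumulating the four property totals at once
--     c = d = f = t = 0
--     for ingredient, amount in combo.items():
--         props = ingredients[ingredient]
--         c += props['capacity'] * amount
--         d += props['durability'] * amount
--         f += props['flavor'] * amount
--         t += props['texture'] * amount
--     if c > 0 and d > 0 and f > 0 and t > 0:
--         return c * d * f * t
--     return 0
-- ===== Notes on version B (the rewrite author's own statement) =====
-- stated objective: alternative
-- what changed: Inverts the loop nesting: one ingredient-outer pass accumulating all four property totals in separate running accumulators (no combo[ingredient] re-lookup, iterating items directly), then a single positivity check and product, instead of A's property-outer loop with per-property re-scan, early return and reduce over a scores list.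
-- outside the precondition, e.g. on _score_combo({'x': 1}, {'x': {'capacity': -1}}): A returns 0, B raises KeyError
import Mathlib
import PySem

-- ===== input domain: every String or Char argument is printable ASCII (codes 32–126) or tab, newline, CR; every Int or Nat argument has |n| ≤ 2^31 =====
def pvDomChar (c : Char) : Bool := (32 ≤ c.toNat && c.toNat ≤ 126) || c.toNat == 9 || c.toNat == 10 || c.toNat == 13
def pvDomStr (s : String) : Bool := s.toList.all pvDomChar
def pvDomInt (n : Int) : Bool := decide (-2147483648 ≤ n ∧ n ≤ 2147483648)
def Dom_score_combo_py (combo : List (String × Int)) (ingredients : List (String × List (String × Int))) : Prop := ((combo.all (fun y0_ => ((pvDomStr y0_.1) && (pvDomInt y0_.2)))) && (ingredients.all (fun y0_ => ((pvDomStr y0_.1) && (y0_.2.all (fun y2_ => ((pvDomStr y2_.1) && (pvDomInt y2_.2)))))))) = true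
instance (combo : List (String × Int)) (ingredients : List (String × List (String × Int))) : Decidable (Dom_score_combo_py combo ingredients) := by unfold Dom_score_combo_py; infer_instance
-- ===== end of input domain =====

-- B inverts A's loop nesting: one ingredient-outer pass with four running totals, then one
-- positivity check and product (objective: alternative decomposition, similar cost).

-- first-match association-list lookup (Python dict lookup)
def pvLookup {α : Type} (l : List (String × α)) (k : String) : Option α :=
  (l.find? (fun kv => kv.1 == k)).map Prod.snd

-- ===== PORT A =====
-- the module constant PROPERTIES
def pvPROPERTIES : List String := ["capacity", "durability", "flavor", "texture"]

-- A's outer loop over PROPERTIES carrying the 'scores' list; early 'return 0' on a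
-- non-positive score; 'reduce(mul, scores, 1)' at the end
def scoreA_props : List String → List Int → List (String × Int) → List (String × List (String × Int)) → Int
  | [], scores, _, _ => scores.foldl (· * ·) 1
  | p :: rest, scores, combo, ingredients =>
    let score := combo.foldl
      (fun s kv =>
        s + ((pvLookup ((pvLookup ingredients kv.1).getD []) p).getD 0)
              * ((pvLookup combo kv.1).getD 0)) 0
    if score > 0 then scoreA_props rest (scores ++ [score]) combo ingredients
    else 0

def score_combo_py (combo : List (String × Int)) (ingredients : List (String × List (String × Int))) : Int :=
  scoreA_props pvPROPERTIES [] combo ingredients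

-- ===== PORT B =====
def score_combo_py_alt (combo : List (String × Int)) (ingredients : List (String × List (String × Int))) : Int :=
  let st := combo.foldl
    (fun (acc : Int × Int × Int × Int) kv =>
      let props := (pvLookup ingredients kv.1).getD []
      (acc.1 + ((pvLookup props "capacity").getD 0) * kv.2,
       acc.2.1 + ((pvLookup props "durability").getD 0) * kv.2,
       acc.2.2.1 + ((pvLookup props "flavor").getD 0) * kv.2,
       acc.2.2.2 + ((pvLookup props "texture").getD 0) * kv.2)) (0, 0, 0, 0)
  if st.1 > 0 ∧ st.2.1 > 0 ∧ st.2.2.1 > 0 ∧ st.2.2.2 > 0 then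
    st.1 * st.2.1 * st.2.2.1 * st.2.2.2
  else 0

-- ===== PRECONDITION & SPEC =====
-- Pre_ excludes (i) association lists with duplicate keys, which cannot arise from a Python
-- dict and on which the first-match list model's behaviour is accidental, and (ii) inputs
-- where some combo ingredient is missing from ingredients or lacks one of the four
-- properties: Python A raises KeyError there except when an earlier non-positive total makes
-- it return 0 before touching the missing key — and on those B itself raises KeyError.
-- Bool check that an association list has pairwise-distinct keys
def pvNodupKeys {α : Type} : List (String × α) → Bool
  | [] => true
  | kv :: tl => tl.all (fun e => !(e.1 == kv.1)) && pvNodupKeys tl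

def Pre_score_combo_py (combo : List (String × Int)) (ingredients : List (String × List (String × Int))) : Prop :=
  (pvNodupKeys combo && pvNodupKeys ingredients &&
   ingredients.all (fun e => pvNodupKeys e.2) &&
   combo.all (fun kv => ingredients.any (fun e =>
     e.1 == kv.1 && pvPROPERTIES.all (fun p => (pvLookup e.2 p).isSome)))) = true
instance (combo : List (String × Int)) (ingredients : List (String × List (String × Int))) : Decidable (Pre_score_combo_py combo ingredients) := by unfold Pre_score_combo_py; infer_instance

def pvWitness_score_combo_py : (List (String × Int)) × (List (String × List (String × Int))) :=
  ([("a", 2)], [("a", [("capacity", 1), ("durability", 1), ("flavor", 1), ("texture", 1)])])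

def Spec_score_combo_py (combo : List (String × Int)) (ingredients : List (String × List (String × Int))) (out : Int) : Prop := out = score_combo_py_alt combo ingredients
instance (combo : List (String × Int)) (ingredients : List (String × List (String × Int))) (out : Int) : Decidable (Spec_score_combo_py combo ingredients out) := by unfold Spec_score_combo_py; infer_instance

-- ===== CLAIM (what is proved, stated in full; the proofs are below) =====
def Claim_equal_score_combo_py : Prop := ∀ (combo : List (String × Int)) (ingredients : List (String × List (String × Int))), Dom_score_combo_py combo ingredients → Pre_score_combo_py combo ingredients → Spec_score_combo_py combo ingredients (score_combo_py combo ingredients)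

-- ===== LEMMAS AND PROOFS =====

-- the per-ingredient property value both ports read
def pvPropVal (ingredients : List (String × List (String × Int))) (name p : String) : Int :=
  (pvLookup ((pvLookup ingredients name).getD []) p).getD 0

-- pvNodupKeys really means the keys are Nodup
theorem nodup_of_pvNodupKeys {α : Type} : ∀ (l : List (String × α)),
    pvNodupKeys l = true → (l.map Prod.fst).Nodup
  | [], _ => by simp
  | hd :: tl, h => by
    simp only [pvNodupKeys, Bool.and_eq_true, List.all_eq_true] at h
    simp only [List.map_cons, List.nodup_cons]
    refine ⟨?_, nodup_of_pvNodupKeys tl h.2⟩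
    intro hmem
    obtain ⟨e, he, heq⟩ := List.mem_map.mp hmem
    have := h.1 e he
    simp [heq] at this

-- under unique keys, the first-match lookup of a member's key returns its value
theorem pvLookup_of_mem {α : Type} : ∀ (l : List (String × α)) (kv : String × α),
    (l.map Prod.fst).Nodup → kv ∈ l → pvLookup l kv.1 = some kv.2
  | [], _, _, hm => by cases hm
  | hd :: tl, kv, hnd, hm => by
    simp only [List.map_cons, List.nodup_cons] at hnd
    rcases List.mem_cons.mp hm with hm | hm
    · subst hm; simp [pvLookup, List.find?]
    · have hne : (hd.1 == kv.1) = false := by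
        refine beq_eq_false_iff_ne.mpr fun h => hnd.1 ?_
        exact h ▸ List.mem_map.mpr ⟨kv, hm, rfl⟩
      simp only [pvLookup, List.find?, hne]
      exact pvLookup_of_mem tl kv hnd.2 hm

-- a foldl that only adds per-element terms is init plus the mapped sum
theorem foldl_add_sum (g : String × Int → Int) (l : List (String × Int)) (init : Int) :
    l.foldl (fun s kv => s + g kv) init = init + (l.map g).sum := by
  induction l generalizing init with
  | nil => simp
  | cons hd tl ih => simp [List.foldl_cons, ih, add_assoc]

-- the property-p total both sides compute
def pvS (combo : List (String × Int)) (ingredients : List (String × List (String × Int))) (p : String) : Int :=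
  (combo.map (fun kv => pvPropVal ingredients kv.1 p * kv.2)).sum

-- A's inner loop for property p equals pvS, once nodup lets combo[ingredient] = kv.2
theorem scoreA_inner_eq (combo : List (String × Int)) (ingredients : List (String × List (String × Int)))
    (p : String) (hnd : (combo.map Prod.fst).Nodup) :
    combo.foldl
      (fun s kv =>
        s + ((pvLookup ((pvLookup ingredients kv.1).getD []) p).getD 0)
              * ((pvLookup combo kv.1).getD 0)) 0 = pvS combo ingredients p := by
  have hcongr : combo.foldl
      (fun s kv =>
        s + ((pvLookup ((pvLookup ingredients kv.1).getD []) p).getD 0)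
              * ((pvLookup combo kv.1).getD 0)) 0
      = combo.foldl (fun s kv => s + pvPropVal ingredients kv.1 p * kv.2) 0 := by
    apply PySem.List.foldl_congr_mem
    intro acc kv hkv
    rw [pvLookup_of_mem combo kv hnd hkv]
    rfl
  rw [hcongr, foldl_add_sum]
  simp [pvS]

-- B's single fold computes the four property totals componentwise
theorem altFold_eq (combo : List (String × Int)) (ingredients : List (String × List (String × Int)))
    (a b c d : Int) :
    combo.foldl
      (fun (acc : Int × Int × Int × Int) kv =>
        let props := (pvLookup ingredients kv.1).getD []
        (acc.1 + ((pvLookup props "capacity").getD 0) * kv.2,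
         acc.2.1 + ((pvLookup props "durability").getD 0) * kv.2,
         acc.2.2.1 + ((pvLookup props "flavor").getD 0) * kv.2,
         acc.2.2.2 + ((pvLookup props "texture").getD 0) * kv.2)) (a, b, c, d)
    = (a + pvS combo ingredients "capacity",
       b + pvS combo ingredients "durability",
       c + pvS combo ingredients "flavor",
       d + pvS combo ingredients "texture") := by
  induction combo generalizing a b c d with
  | nil => simp [pvS]
  | cons hd tl ih =>
    simp only [List.foldl_cons, ih, pvS, List.map_cons, List.sum_cons, pvPropVal,
      Prod.mk.injEq]
    refine ⟨by ring, by ring, by ring, by ring⟩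

-- ===== VERDICT (by name: the statement is the Claim_ definition above) =====
theorem score_combo_py_spec : Claim_equal_score_combo_py := by
  intro combo ingredients _ hpre
  simp only [Pre_score_combo_py, Bool.and_eq_true] at hpre
  have hnd : (combo.map Prod.fst).Nodup := nodup_of_pvNodupKeys combo hpre.1.1.1
  show score_combo_py combo ingredients = score_combo_py_alt combo ingredients
  unfold score_combo_py score_combo_py_alt pvPROPERTIES
  rw [altFold_eq]
  simp only [scoreA_props, scoreA_inner_eq combo ingredients _ hnd, List.nil_append,
    List.append_assoc, List.singleton_append,]
  by_cases h1 : pvS combo ingredients "capacity" > 0 <;>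
    by_cases h2 : pvS combo ingredients "durability" > 0 <;>
      by_cases h3 : pvS combo ingredients "flavor" > 0 <;>
        by_cases h4 : pvS combo ingredients "texture" > 0 <;>
          simp [h1, h2, h3, h4]
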